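-- pv_equiv track=rewrite | github.com/pypi-data/pypi-mirror-402 | packages/runbooks/runbooks-1.2.7-py3-none-any.whl/runbooks/finops/persona_formatter.py | _group_by_tier
-- ===== SOURCE A (Python) =====
-- from typing import Any, Dict, List, Literal, Optional
--
-- def _group_by_tier(resources: List[Dict]) -> Dict[str, List]:
--     """Group resources by decommission tier (KEEP, SHOULD, MUST, COULD)."""
--     tiers = {"KEEP": [], "SHOULD": [], "MUST": [], "COULD": []}
--
--     for resource in resources:
--         tier = resource.get("decommission_tier", "KEEP")
--         if tier in tiers:
--             tiers[tier].append(resource)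
--         else:
--             tiers["KEEP"].append(resource)
--
--     # Filter empty tiers
--     return {k: v for k, v in tiers.items() if v}
-- ===== SOURCE B (Python) =====
-- def _group_by_tier(resources):
--     """Group resources by decommission tier (KEEP, SHOULD, MUST, COULD)."""
--     tier_names = ("KEEP", "SHOULD", "MUST", "COULD")
--
--     def resolve(r):
--         raw = r.get("decommission_tier", "KEEP")
--         return raw if raw in tier_names else "KEEP"
--
--     result = {}
--     for tier in tier_names:
--         bucket = [r for r in resources if resolve(r) == tier]
--         if bucket:
--             result[tier] = bucket
--     return result
-- ===== Notes on version B (the rewrite author's own statement) =====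
-- stated objective: alternative
-- what changed: B replaces A's single assignment pass into a dict of four buckets with a loop over the fixed ordered tier names that filters the resource list once per tier, emitting each non-empty bucket in KEEP/SHOULD/MUST/COULD order.
import Mathlib
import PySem

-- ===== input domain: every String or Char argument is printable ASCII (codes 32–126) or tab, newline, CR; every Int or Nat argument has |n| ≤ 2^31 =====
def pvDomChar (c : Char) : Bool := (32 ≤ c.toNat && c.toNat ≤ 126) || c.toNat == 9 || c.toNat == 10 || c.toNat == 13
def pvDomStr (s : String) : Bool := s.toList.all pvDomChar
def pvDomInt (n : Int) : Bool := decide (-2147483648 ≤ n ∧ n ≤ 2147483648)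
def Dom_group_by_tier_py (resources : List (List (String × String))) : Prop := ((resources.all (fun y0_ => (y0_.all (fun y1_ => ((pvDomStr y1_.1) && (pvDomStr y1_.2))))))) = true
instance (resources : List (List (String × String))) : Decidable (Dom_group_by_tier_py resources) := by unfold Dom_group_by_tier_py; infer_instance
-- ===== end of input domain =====

-- B groups by looping over the fixed four tier names and filtering the resource list once per
-- tier (unknown/missing tiers resolving to KEEP), instead of A's single assignment pass into a
-- dict of buckets; objective: alternative.

-- ===== PORT A =====
-- the loop body of A's `for resource in resources`, step for step
def groupStepA (ts : PySem.Dict String (List (List (String × String)))) (r : List (String × String)) : PySem.Dict String (List (List (String × String))) :=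
  let tier := (PySem.Dict.mk r).getD "decommission_tier" "KEEP"
  if ts.contains tier then ts.modify tier [] (· ++ [r])
  else ts.modify "KEEP" [] (· ++ [r])

def group_by_tier_py (resources : List (List (String × String))) : List (String × List (List (String × String))) :=
  let tiers : PySem.Dict String (List (List (String × String))) :=
    PySem.Dict.mk [("KEEP", []), ("SHOULD", []), ("MUST", []), ("COULD", [])]
  let tiers := resources.foldl groupStepA tiers
  tiers.items.filter (fun kv => !kv.2.isEmpty)

-- ===== PORT B =====
def resolveTier (r : List (String × String)) : String :=
  let raw := (PySem.Dict.mk r).getD "decommission_tier" "KEEP"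
  if raw = "KEEP" ∨ raw = "SHOULD" ∨ raw = "MUST" ∨ raw = "COULD" then raw else "KEEP"

def group_by_tier_py_alt (resources : List (List (String × String))) : List (String × List (List (String × String))) :=
  (["KEEP", "SHOULD", "MUST", "COULD"] : List String).foldl (fun acc t =>
    let bucket := resources.filter (fun r => resolveTier r == t)
    if bucket.isEmpty then acc else acc ++ [(t, bucket)]) []

-- ===== PRECONDITION & SPEC =====
def Spec_group_by_tier_py (resources : List (List (String × String))) (out : List (String × List (List (String × String)))) : Prop := out = group_by_tier_py_alt resources
instance (resources : List (List (String × String))) (out : List (String × List (List (String × String)))) : Decidable (Spec_group_by_tier_py resources out) := by unfold Spec_group_by_tier_py; infer_instance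

-- ===== CLAIM (what is proved, stated in full; the proofs are below) =====
def Claim_equal_group_by_tier_py : Prop := ∀ (resources : List (List (String × String))), Dom_group_by_tier_py resources → Spec_group_by_tier_py resources (group_by_tier_py resources)

-- ===== LEMMAS AND PROOFS =====

theorem groupStepA_keep (r : List (String × String)) (k s m c : List (List (String × String)))
    (h : (PySem.Dict.mk r).getD "decommission_tier" "KEEP" = "KEEP") :
    groupStepA (PySem.Dict.mk [("KEEP", k), ("SHOULD", s), ("MUST", m), ("COULD", c)]) r
      = PySem.Dict.mk [("KEEP", k ++ [r]), ("SHOULD", s), ("MUST", m), ("COULD", c)] := by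
  simp only [groupStepA]; rw [h]
  simp [PySem.Dict.contains, PySem.Dict.modify, PySem.Dict.getD, PySem.Dict.get?, PySem.Dict.insert]

theorem groupStepA_should (r : List (String × String)) (k s m c : List (List (String × String)))
    (h : (PySem.Dict.mk r).getD "decommission_tier" "KEEP" = "SHOULD") :
    groupStepA (PySem.Dict.mk [("KEEP", k), ("SHOULD", s), ("MUST", m), ("COULD", c)]) r
      = PySem.Dict.mk [("KEEP", k), ("SHOULD", s ++ [r]), ("MUST", m), ("COULD", c)] := by
  simp only [groupStepA]; rw [h]
  simp [PySem.Dict.contains, PySem.Dict.modify, PySem.Dict.getD, PySem.Dict.get?, PySem.Dict.insert]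

theorem groupStepA_must (r : List (String × String)) (k s m c : List (List (String × String)))
    (h : (PySem.Dict.mk r).getD "decommission_tier" "KEEP" = "MUST") :
    groupStepA (PySem.Dict.mk [("KEEP", k), ("SHOULD", s), ("MUST", m), ("COULD", c)]) r
      = PySem.Dict.mk [("KEEP", k), ("SHOULD", s), ("MUST", m ++ [r]), ("COULD", c)] := by
  simp only [groupStepA]; rw [h]
  simp [PySem.Dict.contains, PySem.Dict.modify, PySem.Dict.getD, PySem.Dict.get?, PySem.Dict.insert]

theorem groupStepA_could (r : List (String × String)) (k s m c : List (List (String × String)))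
    (h : (PySem.Dict.mk r).getD "decommission_tier" "KEEP" = "COULD") :
    groupStepA (PySem.Dict.mk [("KEEP", k), ("SHOULD", s), ("MUST", m), ("COULD", c)]) r
      = PySem.Dict.mk [("KEEP", k), ("SHOULD", s), ("MUST", m), ("COULD", c ++ [r])] := by
  simp only [groupStepA]; rw [h]
  simp [PySem.Dict.contains, PySem.Dict.modify, PySem.Dict.getD, PySem.Dict.get?, PySem.Dict.insert]

theorem groupStepA_other (r : List (String × String)) (k s m c : List (List (String × String)))
    (h1 : (PySem.Dict.mk r).getD "decommission_tier" "KEEP" ≠ "KEEP")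
    (h2 : (PySem.Dict.mk r).getD "decommission_tier" "KEEP" ≠ "SHOULD")
    (h3 : (PySem.Dict.mk r).getD "decommission_tier" "KEEP" ≠ "MUST")
    (h4 : (PySem.Dict.mk r).getD "decommission_tier" "KEEP" ≠ "COULD") :
    groupStepA (PySem.Dict.mk [("KEEP", k), ("SHOULD", s), ("MUST", m), ("COULD", c)]) r
      = PySem.Dict.mk [("KEEP", k ++ [r]), ("SHOULD", s), ("MUST", m), ("COULD", c)] := by
  simp only [groupStepA]
  generalize hT : (PySem.Dict.mk r).getD "decommission_tier" "KEEP" = T at h1 h2 h3 h4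
  simp [PySem.Dict.contains, PySem.Dict.modify, PySem.Dict.getD, PySem.Dict.get?,
    PySem.Dict.insert, Ne.symm h1, Ne.symm h2, Ne.symm h3, Ne.symm h4]

-- A's assignment loop, started from any four buckets, appends exactly the per-tier filters.
theorem foldA_eq (resources : List (List (String × String)))
    (k s m c : List (List (String × String))) :
    resources.foldl groupStepA
      (PySem.Dict.mk [("KEEP", k), ("SHOULD", s), ("MUST", m), ("COULD", c)]) =
    PySem.Dict.mk [("KEEP", k ++ resources.filter (fun r => resolveTier r == "KEEP")),
                   ("SHOULD", s ++ resources.filter (fun r => resolveTier r == "SHOULD")),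
                   ("MUST", m ++ resources.filter (fun r => resolveTier r == "MUST")),
                   ("COULD", c ++ resources.filter (fun r => resolveTier r == "COULD"))] := by
  induction resources generalizing k s m c with
  | nil => simp
  | cons r rs ih =>
    rw [List.foldl_cons]
    by_cases h1 : (PySem.Dict.mk r).getD "decommission_tier" "KEEP" = "KEEP"
    · rw [groupStepA_keep r k s m c h1, ih]
      simp [resolveTier, h1]
    · by_cases h2 : (PySem.Dict.mk r).getD "decommission_tier" "KEEP" = "SHOULD"
      · rw [groupStepA_should r k s m c h2, ih]
        simp [resolveTier, h2]
      · by_cases h3 : (PySem.Dict.mk r).getD "decommission_tier" "KEEP" = "MUST"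
        · rw [groupStepA_must r k s m c h3, ih]
          simp [resolveTier, h3]
        · by_cases h4 : (PySem.Dict.mk r).getD "decommission_tier" "KEEP" = "COULD"
          · rw [groupStepA_could r k s m c h4, ih]
            simp [resolveTier, h4]
          · rw [groupStepA_other r k s m c h1 h2 h3 h4, ih]
            simp [resolveTier, h1, h2, h3, h4]

-- ===== VERDICT (by name: the statement is the Claim_ definition above) =====
theorem group_by_tier_py_spec : Claim_equal_group_by_tier_py := by
  intro resources _
  unfold Spec_group_by_tier_py group_by_tier_py group_by_tier_py_alt
  dsimp only
  rw [foldA_eq resources [] [] [] []]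
  simp only [List.nil_append, List.foldl]
  generalize (List.filter (fun r => resolveTier r == "KEEP") resources) = bK
  generalize (List.filter (fun r => resolveTier r == "SHOULD") resources) = bS
  generalize (List.filter (fun r => resolveTier r == "MUST") resources) = bM
  generalize (List.filter (fun r => resolveTier r == "COULD") resources) = bC
  cases bK <;> cases bS <;> cases bM <;> cases bC <;> simp [List.filter]
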